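-- pv_equiv track=rewrite | github.com/bstrb/dynamicity | ici/ici_v.1.1/propose_next_shifts copy.py | _group_blocks
-- ===== SOURCE A (Python) =====
-- from typing import Dict, List, Optional, Tuple
--
-- def _group_blocks(lines: List[str]) -> List[Tuple[str, List[str]]]:
--     """
--     Group the log into blocks:
--         ("#/abs/path/to/file.h5 event 123", [header_line, csv_line1, csv_line2, ...])
--     """
--     blocks: List[Tuple[str, List[str]]] = []
--     cur_header: Optional[str] = None
--     cur: List[str] = []
--     for ln in lines:
--         if ln.startswith("#/") and " event " in ln:
--             if cur:
--                 blocks.append((cur_header or "", cur))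
--             cur_header = ln.rstrip("\n")
--             cur = [ln]
--         else:
--             cur.append(ln)
--     if cur:
--         blocks.append((cur_header or "", cur))
--     return blocks
-- ===== SOURCE B (Python) =====
-- from typing import List, Tuple
--
-- def _group_blocks(lines: List[str]) -> List[Tuple[str, List[str]]]:
--     # Single pass over the lines in REVERSE: a block is emitted the moment its
--     # header is reached from the right; `cur` holds the lines seen since the
--     # last emitted block (in reverse order).
--     blocks: List[Tuple[str, List[str]]] = []
--     cur: List[str] = []
--     for ln in reversed(lines):
--         if ln.startswith("#/") and " event " in ln:
--             blocks.append((ln.rstrip("\n"), [ln] + cur[::-1]))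
--             cur = []
--         else:
--             cur.append(ln)
--     return ([("", cur[::-1])] if cur else []) + blocks[::-1]
-- ===== Notes on version B (the rewrite author's own statement) =====
-- stated objective: alternative
-- what changed: B makes a single pass over the lines in reverse, emitting each block the moment its header line is reached from the right, instead of A's forward scan carrying a pending header and a mutable current-block accumulator that is flushed on the next header and at the end.
import Mathlib
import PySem

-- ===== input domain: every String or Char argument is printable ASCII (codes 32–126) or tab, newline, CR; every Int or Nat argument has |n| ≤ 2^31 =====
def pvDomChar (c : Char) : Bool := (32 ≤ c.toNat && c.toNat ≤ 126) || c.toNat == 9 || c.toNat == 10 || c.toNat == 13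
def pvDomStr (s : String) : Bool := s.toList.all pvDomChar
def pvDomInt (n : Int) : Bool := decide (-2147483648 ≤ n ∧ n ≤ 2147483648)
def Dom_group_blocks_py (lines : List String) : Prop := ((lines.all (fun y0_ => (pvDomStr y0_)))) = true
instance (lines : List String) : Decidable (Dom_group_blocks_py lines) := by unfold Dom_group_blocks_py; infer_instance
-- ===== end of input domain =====

-- B replaces A's forward scan (pending header + flushed accumulator) by one reverse pass
-- that emits a block as soon as its header is reached from the right; same cost, different shape.

-- shared primitive ports: the header test and ln.rstrip("\n")
def pvIsHeader (ln : String) : Bool :=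
  PySem.Str.startswith ln "#/" && PySem.Str.isIn " event " ln

-- hand port of ln.rstrip("\n") (single strip char): exact — drops all trailing '\n'
def pvRstripNl (ln : String) : String :=
  String.ofList ((ln.toList.reverse.dropWhile (fun c => c == '\n')).reverse)

-- ===== PORT A =====
-- the for-loop of A as structural recursion over the same state (blocks, cur_header, cur);
-- the base case is the trailing `if cur: blocks.append(...)`
def groupBlocksGo (blocks : List (String × List String)) (curHeader : Option String)
    (cur : List String) : List String → List (String × List String)
  | [] => if cur ≠ [] then blocks ++ [(curHeader.getD "", cur)] else blocks
  | ln :: rest =>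
    if pvIsHeader ln then
      groupBlocksGo (if cur ≠ [] then blocks ++ [(curHeader.getD "", cur)] else blocks)
        (some (pvRstripNl ln)) [ln] rest
    else
      groupBlocksGo blocks curHeader (cur ++ [ln]) rest

def group_blocks_py (lines : List String) : List (String × List String) :=
  groupBlocksGo [] none [] lines

-- ===== PORT B =====
-- `for ln in reversed(lines)` as a foldl over lines.reverse with state (blocks, cur)
def group_blocks_py_alt (lines : List String) : List (String × List String) :=
  let st := lines.reverse.foldl
    (fun (acc : List (String × List String) × List String) ln =>
      if pvIsHeader ln then (acc.1 ++ [(pvRstripNl ln, ln :: acc.2.reverse)], [])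
      else (acc.1, acc.2 ++ [ln])) ([], [])
  (if st.2 ≠ [] then [("", st.2.reverse)] else []) ++ st.1.reverse

-- ===== PRECONDITION & SPEC =====
def Spec_group_blocks_py (lines : List String) (out : List (String × List String)) : Prop := out = group_blocks_py_alt lines
instance (lines : List String) (out : List (String × List String)) : Decidable (Spec_group_blocks_py lines out) := by unfold Spec_group_blocks_py; infer_instance

-- ===== CLAIM (what is proved, stated in full; the proofs are below) =====
def Claim_equal_group_blocks_py : Prop := ∀ (lines : List String), Dom_group_blocks_py lines → Spec_group_blocks_py lines (group_blocks_py lines)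

-- ===== LEMMAS AND PROOFS =====

-- reference recursion: specR lines = (header blocks of lines, leading segment before the first header)
def specR : List String → List (String × List String) × List String
  | [] => ([], [])
  | ln :: rest =>
    let p := specR rest
    if pvIsHeader ln then ((pvRstripNl ln, ln :: p.2) :: p.1, [])
    else (p.1, ln :: p.2)

theorem goA_eq (rest : List String) : ∀ (blocks : List (String × List String))
    (curHeader : Option String) (cur : List String),
    groupBlocksGo blocks curHeader cur rest =
      blocks ++ (if cur ++ (specR rest).2 ≠ [] then
        [(curHeader.getD "", cur ++ (specR rest).2)] else []) ++ (specR rest).1 := by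
  induction rest with
  | nil =>
    intro blocks curHeader cur
    simp [groupBlocksGo, specR]
    by_cases h : cur = [] <;> simp [h]
  | cons ln rest ih =>
    intro blocks curHeader cur
    by_cases h : pvIsHeader ln
    · simp only [groupBlocksGo, specR, h, if_pos, ih]
      by_cases hc : cur = [] <;> simp [hc]
    · simp only [groupBlocksGo, specR, h, ih, Bool.false_eq_true, if_false]
      simp

theorem foldrB_eq (lines : List String) :
    lines.foldr (fun ln (acc : List (String × List String) × List String) =>
      if pvIsHeader ln then (acc.1 ++ [(pvRstripNl ln, ln :: acc.2.reverse)], [])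
      else (acc.1, acc.2 ++ [ln])) ([], []) =
    ((specR lines).1.reverse, (specR lines).2.reverse) := by
  induction lines with
  | nil => simp [specR]
  | cons ln rest ih =>
    by_cases h : pvIsHeader ln <;> simp [specR, h, ih]

theorem alt_eq_spec (lines : List String) :
    group_blocks_py_alt lines =
      (if (specR lines).2 ≠ [] then [("", (specR lines).2)] else []) ++ (specR lines).1 := by
  unfold group_blocks_py_alt
  rw [List.foldl_reverse, foldrB_eq]
  by_cases h : (specR lines).2 = [] <;> simp [h]

-- ===== VERDICT (by name: the statement is the Claim_ definition above) =====
theorem group_blocks_py_spec : Claim_equal_group_blocks_py := by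
  intro lines _
  unfold Spec_group_blocks_py
  rw [alt_eq_spec]
  unfold group_blocks_py
  rw [goA_eq]
  simp
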